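-- pv_equiv track=rewrite | github.com/saveligulas/advent_of_code | 3_2.py | only_one_number
-- ===== SOURCE A (Python) =====
-- def only_one_number(checklist):
--     number_found = False
--     numbers_found = 0
--     for symbol in checklist:
--         if symbol.isdigit() and not number_found:
--             number_found = True
--             numbers_found += 1
--         if not symbol.isdigit():
--             number_found = False
--     if numbers_found == 1:
--         return True
--     return False
-- ===== SOURCE B (Python) =====
-- def only_one_number(checklist):
--     s = list(checklist)
--     n = len(s)
--     i = 0
--     # stage 1: skip to the first digit
--     while i < n and not s[i].isdigit():
--         i += 1
--     if i == n:
--         return False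
--     # stage 2: skip over the digit run
--     while i < n and s[i].isdigit():
--         i += 1
--     # stage 3: there must be no digit anywhere after it
--     return all(not c.isdigit() for c in s[i:])
-- ===== Notes on version B (the rewrite author's own statement) =====
-- stated objective: alternative
-- what changed: Replaces A's counting loop with a three-stage short-circuit scan: skip to the first digit (none -> False), skip past that digit run, then require no digit in the remainder.
import Mathlib
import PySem

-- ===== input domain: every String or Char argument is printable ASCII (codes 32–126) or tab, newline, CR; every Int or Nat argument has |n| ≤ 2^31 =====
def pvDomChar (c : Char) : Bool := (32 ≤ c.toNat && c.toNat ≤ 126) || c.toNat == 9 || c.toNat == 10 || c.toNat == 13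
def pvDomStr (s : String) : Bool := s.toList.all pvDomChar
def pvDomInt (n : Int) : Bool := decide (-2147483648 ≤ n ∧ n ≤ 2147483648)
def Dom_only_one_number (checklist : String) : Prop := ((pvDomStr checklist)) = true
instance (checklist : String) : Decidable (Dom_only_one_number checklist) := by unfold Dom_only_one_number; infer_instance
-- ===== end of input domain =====

-- B replaces A's counting loop with a three-stage short-circuit scan: skip to the
-- first digit (none -> False), skip past that digit run, then require no digit after
-- it (alternative decomposition, same cost).

-- ===== PORT A =====
def only_one_number (checklist : String) : Bool :=
  let st := checklist.toList.foldl (fun (st : Bool × Int) symbol =>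
    let st := if PySem.Chars.isdigit symbol && !st.1 then (true, st.2 + 1) else st
    if !(PySem.Chars.isdigit symbol) then (false, st.2) else st) (false, 0)
  if st.2 == 1 then true else false

-- ===== PORT B =====
-- stage 1: 'while i < n and not s[i].isdigit(): i += 1' — returns the remaining list
def skipNonDigits : List Char → List Char
  | [] => []
  | c :: r => if !(PySem.Chars.isdigit c) then skipNonDigits r else c :: r

-- stage 2: 'while i < n and s[i].isdigit(): i += 1'
def skipDigits : List Char → List Char
  | [] => []
  | c :: r => if PySem.Chars.isdigit c then skipDigits r else c :: r

def only_one_number_alt (checklist : String) : Bool :=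
  let s := checklist.toList
  match skipNonDigits s with
  | [] => false
  | c :: r => (skipDigits (c :: r)).all (fun c => !(PySem.Chars.isdigit c))

-- ===== PRECONDITION & SPEC =====
def Spec_only_one_number (checklist : String) (out : Bool) : Prop := out = only_one_number_alt checklist
instance (checklist : String) (out : Bool) : Decidable (Spec_only_one_number checklist out) := by unfold Spec_only_one_number; infer_instance

-- ===== CLAIM (what is proved, stated in full; the proofs are below) =====
def Claim_equal_only_one_number : Prop := ∀ (checklist : String), Dom_only_one_number checklist → Spec_only_one_number checklist (only_one_number checklist)

-- ===== LEMMAS AND PROOFS =====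

-- number of digit-run starts in l, given whether the previous char was a digit
def starts (b : Bool) : List Char → Nat
  | [] => 0
  | c :: r => (if PySem.Chars.isdigit c && !b then 1 else 0) + starts (PySem.Chars.isdigit c) r

-- A's loop step, simplified: new flag = 'symbol is a digit'; count gains 1 iff a run starts
lemma stepA (st : Bool × Int) (c : Char) :
    (let st' := if PySem.Chars.isdigit c && !st.1 then (true, st.2 + 1) else st
     if !(PySem.Chars.isdigit c) then (false, st'.2) else st')
    = (PySem.Chars.isdigit c,
       st.2 + (if PySem.Chars.isdigit c && !st.1 then 1 else 0)) := by
  cases h : PySem.Chars.isdigit c <;> cases hb : st.1 <;>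
    simp [hb, Prod.ext_iff]

-- A's loop invariant: the fold from (b, k) yields k plus the run-start count
lemma foldA_eq (l : List Char) (b : Bool) (k : Int) :
    l.foldl (fun (st : Bool × Int) symbol =>
      let st := if PySem.Chars.isdigit symbol && !st.1 then (true, st.2 + 1) else st
      if !(PySem.Chars.isdigit symbol) then (false, st.2) else st) (b, k)
    = (match l.getLast? with | some c => PySem.Chars.isdigit c | none => b,
       k + (starts b l : Int)) := by
  induction l generalizing b k with
  | nil => simp [starts]
  | cons c rest ih =>
    rw [List.foldl_cons, stepA (b, k) c, ih]
    cases rest with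
    | nil =>
      cases h : (PySem.Chars.isdigit c && !b) <;> simp [h, starts]
    | cons d r =>
      obtain ⟨x, hx⟩ := Option.isSome_iff_exists.mp
        (by simp [List.getLast?_isSome] : ((d :: r).getLast?).isSome = true)
      cases h : (PySem.Chars.isdigit c && !b) <;> simp [h, hx, starts] <;> ring

lemma starts_false_zero (l : List Char) :
    (starts false l = 0) = (l.all (fun c => !(PySem.Chars.isdigit c)) = true) := by
  induction l with
  | nil => simp [starts]
  | cons c r ih =>
    cases h : PySem.Chars.isdigit c <;> simp [starts, h, ih]

lemma starts_true_zero (l : List Char) :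
    (starts true l = 0) = ((skipDigits l).all (fun c => !(PySem.Chars.isdigit c)) = true) := by
  induction l with
  | nil => simp [starts, skipDigits]
  | cons c r ih =>
    cases h : PySem.Chars.isdigit c <;>
      simp [starts, skipDigits, h, ih, starts_false_zero]

-- B's staged scan decides 'exactly one run start'
lemma altChar (l : List Char) :
    (match skipNonDigits l with
     | [] => false
     | c :: r => (skipDigits (c :: r)).all (fun c => !(PySem.Chars.isdigit c)))
    = decide (starts false l = 1) := by
  induction l with
  | nil => simp [skipNonDigits, starts]
  | cons c r ih =>
    cases h : PySem.Chars.isdigit c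
    · simpa [skipNonDigits, starts, h] using ih
    · simp only [skipNonDigits, skipDigits, starts, h]
      cases hall : (skipDigits r).all (fun c => !(PySem.Chars.isdigit c)) with
      | true => simp_all [starts_true_zero, List.all_eq_true]
      | false =>
        have hne : ¬ (starts true r = 0) := by
          rw [starts_true_zero]
          simp [hall]
        simp [hne, h]
        obtain ⟨x, hx, hd⟩ := List.all_eq_false.mp hall
        exact ⟨x, hx, by simpa using hd⟩

-- ===== VERDICT (by name: the statement is the Claim_ definition above) =====
theorem only_one_number_spec : Claim_equal_only_one_number := by
  intro checklist _
  show _ = _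
  simp only [only_one_number, only_one_number_alt, foldA_eq]
  rw [altChar checklist.toList]
  by_cases h1 : starts false checklist.toList = 1 <;> simp [h1]
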